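-- pv_equiv track=rewrite | github.com/Lytrix/pdokbaggeocoder | bag_geocode.py | findColumns
-- ===== SOURCE A (Python) =====
-- def findColumns(data):
--     # Key names
--     first_row = []
--     city_titles = [
--         'stad',
--         'city',
--         'woonplaats',
--         'plaats']
--     street_titles = [
--         'adres',
--         'address',
--         'straat',
--         'straatnaam',
--         'weg',
--         'addresses',
--         'locatie']
--     zipcode_titles = [
--         'postcode',
--         'pc',
--         'pc6',
--         'pc4',
--         'pc5',
--         'zipcode',
--         'zip']
--     housenumber_titles = [
--         'huisnummer',
--         'nummer',
--         'huisnr.',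
--         'nr',
--         'nr.',
--         'house number',
--         'housenumber']
--
--     columns = {
--         "address_column": '',
--         "housenumber_column": '',
--         "zipcode_column": '',
--         "city_column": ''}
--
--     for key in data[0].keys():
--         if key.lower() in city_titles:
--             columns["city_column"] = key
--         if key.lower() in street_titles:
--             columns["address_column"] = key
--         if key.lower() in zipcode_titles:
--             columns["zipcode_column"] = key
--         if key.lower() in housenumber_titles:
--             columns["housenumber_column"] = key
--     return columns
-- ===== SOURCE B (Python) =====
-- def findColumns(data):
--     city_titles = [
--         'stad',
--         'city',
--         'woonplaats',
--         'plaats']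
--     street_titles = [
--         'adres',
--         'address',
--         'straat',
--         'straatnaam',
--         'weg',
--         'addresses',
--         'locatie']
--     zipcode_titles = [
--         'postcode',
--         'pc',
--         'pc6',
--         'pc4',
--         'pc5',
--         'zipcode',
--         'zip']
--     housenumber_titles = [
--         'huisnummer',
--         'nummer',
--         'huisnr.',
--         'nr',
--         'nr.',
--         'house number',
--         'housenumber']
--
--     keys = list(data[0].keys())
--
--     def last_match(titles):
--         # last key whose lowercase form is a known title = first match scanning backwards
--         return next((k for k in reversed(keys) if k.lower() in titles), '')
--
--     return {
--         "address_column": last_match(street_titles),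
--         "housenumber_column": last_match(housenumber_titles),
--         "zipcode_column": last_match(zipcode_titles),
--         "city_column": last_match(city_titles)}
-- ===== Notes on version B (the rewrite author's own statement) =====
-- stated objective: alternative
-- what changed: Replaces A's per-key forward loop that overwrites a shared columns dict with a per-role backward scan: for each of the four roles B takes the first matching key of reversed(keys) (= A's last-write-wins) and builds the result dict directly.
import Mathlib
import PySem

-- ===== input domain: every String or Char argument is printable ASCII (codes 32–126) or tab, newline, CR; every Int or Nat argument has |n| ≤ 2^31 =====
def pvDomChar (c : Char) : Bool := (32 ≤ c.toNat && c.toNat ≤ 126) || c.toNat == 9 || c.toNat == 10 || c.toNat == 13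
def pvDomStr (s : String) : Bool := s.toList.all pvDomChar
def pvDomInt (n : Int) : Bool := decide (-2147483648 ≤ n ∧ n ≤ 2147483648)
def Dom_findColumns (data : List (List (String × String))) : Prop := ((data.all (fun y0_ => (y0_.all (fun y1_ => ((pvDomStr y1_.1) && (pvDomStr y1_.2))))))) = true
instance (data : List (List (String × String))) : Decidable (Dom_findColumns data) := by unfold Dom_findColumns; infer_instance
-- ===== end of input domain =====

-- B replaces A's per-key loop overwriting a shared columns dict by a per-role backward
-- scan taking the first matching key of the reversed key list (alternative decomposition).


-- ===== PORT A =====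
-- title lists shared verbatim by both Pythons
def pvCityTitles : List String := ["stad", "city", "woonplaats", "plaats"]
def pvStreetTitles : List String :=
  ["adres", "address", "straat", "straatnaam", "weg", "addresses", "locatie"]
def pvZipcodeTitles : List String := ["postcode", "pc", "pc6", "pc4", "pc5", "zipcode", "zip"]
def pvHousenumberTitles : List String :=
  ["huisnummer", "nummer", "huisnr.", "nr", "nr.", "house number", "housenumber"]

def findColumns (data : List (List (String × String))) : List (String × String) :=
  let columns : PySem.Dict String String :=
    PySem.Dict.ofList
      [("address_column", ""), ("housenumber_column", ""), ("zipcode_column", ""),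
       ("city_column", "")]
  ((PySem.Dict.ofList (PySem.List.pyGetD data 0 [])).keys.foldl
    (fun columns key =>
      let columns :=
        if pvCityTitles.contains (PySem.Str.lower key) then columns.insert "city_column" key
        else columns
      let columns :=
        if pvStreetTitles.contains (PySem.Str.lower key) then columns.insert "address_column" key
        else columns
      let columns :=
        if pvZipcodeTitles.contains (PySem.Str.lower key) then columns.insert "zipcode_column" key
        else columns
      if pvHousenumberTitles.contains (PySem.Str.lower key) then
        columns.insert "housenumber_column" key
      else columns)
    columns).items

-- ===== PORT B =====
-- next((k for k in reversed(keys) if k.lower() in titles), '')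
def pvLastMatch (keys : List String) (titles : List String) : String :=
  match keys.reverse.find? (fun k => titles.contains (PySem.Str.lower k)) with
  | some k => k
  | none => ""

def findColumns_alt (data : List (List (String × String))) : List (String × String) :=
  let keys := (PySem.Dict.ofList (PySem.List.pyGetD data 0 [])).keys
  [("address_column", pvLastMatch keys pvStreetTitles),
   ("housenumber_column", pvLastMatch keys pvHousenumberTitles),
   ("zipcode_column", pvLastMatch keys pvZipcodeTitles),
   ("city_column", pvLastMatch keys pvCityTitles)]

-- ===== PRECONDITION & SPEC =====
-- Python A evaluates data[0]: it raises IndexError on empty data, hence excluded.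
def Pre_findColumns (data : List (List (String × String))) : Prop := data ≠ []
instance (data : List (List (String × String))) : Decidable (Pre_findColumns data) := by
  unfold Pre_findColumns; infer_instance
def pvWitness_findColumns : (List (List (String × String))) := [[("Straat", "1"), ("Stad", "A")]]

def Spec_findColumns (data : List (List (String × String))) (out : List (String × String)) : Prop := out = findColumns_alt data
instance (data : List (List (String × String))) (out : List (String × String)) : Decidable (Spec_findColumns data out) := by unfold Spec_findColumns; infer_instance

-- ===== CLAIM (what is proved, stated in full; the proofs are below) =====
def Claim_equal_findColumns : Prop := ∀ (data : List (List (String × String))), Dom_findColumns data → Pre_findColumns data → Spec_findColumns data (findColumns data)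

-- ===== LEMMAS AND PROOFS =====

-- a last-write-wins fold equals the first match of the reversed list
theorem foldl_if_eq_find_reverse (p : String → Bool) (ks : List String) (a : String) :
    ks.foldl (fun acc k => if p k then k else acc) a
      = ((ks.reverse.find? p).getD a) := by
  induction ks generalizing a with
  | nil => simp
  | cons k ks ih =>
    simp only [List.foldl_cons, List.reverse_cons, List.find?_append, ih]
    cases ks.reverse.find? p with
    | some x => simp
    | none => simp only [List.find?_singleton, Option.getD_none]; split <;> simp_all

-- one step of A's loop on the four-entry columns dict
theorem stepA_items (a1 a2 a3 a4 key : String) :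
    ((let columns : PySem.Dict String String :=
        PySem.Dict.mk [("address_column", a1), ("housenumber_column", a2),
                       ("zipcode_column", a3), ("city_column", a4)]
      let columns :=
        if pvCityTitles.contains (PySem.Str.lower key) then columns.insert "city_column" key
        else columns
      let columns :=
        if pvStreetTitles.contains (PySem.Str.lower key) then columns.insert "address_column" key
        else columns
      let columns :=
        if pvZipcodeTitles.contains (PySem.Str.lower key) then columns.insert "zipcode_column" key
        else columns
      if pvHousenumberTitles.contains (PySem.Str.lower key) then
        columns.insert "housenumber_column" key
      else columns) : PySem.Dict String String)
    = PySem.Dict.mk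
        [("address_column", if pvStreetTitles.contains (PySem.Str.lower key) then key else a1),
         ("housenumber_column", if pvHousenumberTitles.contains (PySem.Str.lower key) then key else a2),
         ("zipcode_column", if pvZipcodeTitles.contains (PySem.Str.lower key) then key else a3),
         ("city_column", if pvCityTitles.contains (PySem.Str.lower key) then key else a4)] := by
  split_ifs <;> simp [PySem.Dict.insert]

-- A's whole loop, with the accumulator generalized
theorem loopA_items (ks : List String) (a1 a2 a3 a4 : String) :
    ks.foldl
      (fun columns key =>
        let columns :=
          if pvCityTitles.contains (PySem.Str.lower key) then columns.insert "city_column" key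
          else columns
        let columns :=
          if pvStreetTitles.contains (PySem.Str.lower key) then columns.insert "address_column" key
          else columns
        let columns :=
          if pvZipcodeTitles.contains (PySem.Str.lower key) then columns.insert "zipcode_column" key
          else columns
        if pvHousenumberTitles.contains (PySem.Str.lower key) then
          columns.insert "housenumber_column" key
        else columns)
      (PySem.Dict.mk [("address_column", a1), ("housenumber_column", a2),
                      ("zipcode_column", a3), ("city_column", a4)])
    = PySem.Dict.mk
        [("address_column",
            ks.foldl (fun acc k => if pvStreetTitles.contains (PySem.Str.lower k) then k else acc) a1),
         ("housenumber_column",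
            ks.foldl (fun acc k => if pvHousenumberTitles.contains (PySem.Str.lower k) then k else acc) a2),
         ("zipcode_column",
            ks.foldl (fun acc k => if pvZipcodeTitles.contains (PySem.Str.lower k) then k else acc) a3),
         ("city_column",
            ks.foldl (fun acc k => if pvCityTitles.contains (PySem.Str.lower k) then k else acc) a4)] := by
  induction ks generalizing a1 a2 a3 a4 with
  | nil => rfl
  | cons k ks ih =>
    simp only [List.foldl_cons]
    rw [stepA_items a1 a2 a3 a4 k]
    exact ih _ _ _ _

theorem pvLastMatch_eq (keys titles : List String) :
    pvLastMatch keys titles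
      = ((keys.reverse.find? (fun k => titles.contains (PySem.Str.lower k))).getD "") := by
  unfold pvLastMatch
  cases keys.reverse.find? (fun k => titles.contains (PySem.Str.lower k)) <;> simp

-- ===== VERDICT (by name: the statement is the Claim_ definition above) =====
theorem findColumns_spec : Claim_equal_findColumns := by
  intro data _ _
  unfold Spec_findColumns findColumns findColumns_alt
  have hofl : PySem.Dict.ofList
      ([("address_column", ""), ("housenumber_column", ""), ("zipcode_column", ""),
        ("city_column", "")] : List (String × String))
      = PySem.Dict.mk [("address_column", ""), ("housenumber_column", ""),
                       ("zipcode_column", ""), ("city_column", "")] := by decide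
  simp only [hofl, loopA_items, foldl_if_eq_find_reverse, pvLastMatch_eq]
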